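-- pv_equiv track=rewrite | github.com/pypi-data/pypi-mirror-40 | packages/mp-utils/mp_utils-1.0.tar.gz/mp_utils-1.0/mp_utils/ocr.py | determine_label
-- ===== SOURCE A (Python) =====
-- import operator
--
-- def determine_label(words, dictionary):
--     """from a list of words and a dictionary determine the closest label.
--
--     :param words: candidate words extracted via ocr
--     :type words: list
--     :param dictionary: dictionary with lists of corrections
--     :type dictionary: dict
--     :return: label
--     :rtype: str
--     """
--     # to store the candidates and their scores
--     candidates = {}
--
--     # for each candidate iterate through the dictionary and calculate a score
--     for w in words:
--         for key, value in dictionary.items():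
--             score = 0
--             for v in value:
--                 # check exact match
--                 if w == v:
--                     score += 4
--                 # check substring match
--                 elif v in w:
--                     score += 1
--             if key in candidates:
--                 candidates[key] += score
--             else:
--                 candidates[key] = score
--
--     # sort the candidate dict based on the score, highest first
--     sorted_candidates = sorted(
--         candidates.items(), key=operator.itemgetter(1), reverse=True)
--
--     # if there are no candidates or the score of the top candidate is 0
--     if (not sorted_candidates) or (sorted_candidates[0][1] == 0):
--         label = '(none)'
--     # if there is a top scoring candidate
--     else:
--         label = sorted_candidates[0][0]
--
--     return label
-- ===== SOURCE B (Python) =====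
-- def determine_label(words, dictionary):
--     """Single pass: track the best-scoring key directly instead of building
--     and sorting a candidates dict."""
--     best_key, best_score = '(none)', 0
--     for key, value in dictionary.items():
--         score = sum(4 if w == v else (1 if v in w else 0)
--                     for v in value for w in words)
--         if score > best_score:
--             best_key, best_score = key, score
--     return best_key
-- ===== Notes on version B (the rewrite author's own statement) =====
-- stated objective: simpler
-- what changed: B replaces A's candidates dict, the per-word accumulation pass and the descending stable sort by one direct pass over the dictionary that sums each key's score and tracks the running best with a strict comparison (same first-key tie-break, '(none)' when no score is positive).
import Mathlib
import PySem

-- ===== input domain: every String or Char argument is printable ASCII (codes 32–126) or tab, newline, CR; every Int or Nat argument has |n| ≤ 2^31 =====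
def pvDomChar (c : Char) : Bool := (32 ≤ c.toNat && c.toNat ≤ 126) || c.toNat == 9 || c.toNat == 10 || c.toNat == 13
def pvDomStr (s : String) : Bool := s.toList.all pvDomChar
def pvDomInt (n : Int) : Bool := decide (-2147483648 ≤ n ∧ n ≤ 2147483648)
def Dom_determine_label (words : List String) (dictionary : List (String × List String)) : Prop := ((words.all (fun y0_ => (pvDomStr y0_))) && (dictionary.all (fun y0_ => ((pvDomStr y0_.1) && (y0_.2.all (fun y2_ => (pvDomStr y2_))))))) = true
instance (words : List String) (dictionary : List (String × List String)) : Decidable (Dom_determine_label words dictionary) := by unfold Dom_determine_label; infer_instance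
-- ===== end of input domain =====

-- B replaces A's candidates-dict + descending sort by a single running-best pass over the
-- dictionary (objective: simpler; the return value is the only effect, neither version mutates).

-- ===== PORT A =====
-- inner loop over one key's correction list: exact match +4, else substring match +1
def scoreWord (w : String) (value : List String) : Int :=
  value.foldl (fun score v =>
    if w = v then score + 4
    else if PySem.Str.isIn v w then score + 1
    else score) 0

-- body of A's loop over dictionary.items(): candidates[key] += score / candidates[key] = score
def innerStep (w : String) (cand : PySem.Dict String Int) (kv : String × List String) :
    PySem.Dict String Int :=
  let score := scoreWord w kv.2
  if cand.contains kv.1 then cand.insert kv.1 (cand.getD kv.1 0 + score)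
  else cand.insert kv.1 score

def determine_label (words : List String) (dictionary : List (String × List String)) : String :=
  -- `dictionary` is the assoc-list image of a Python dict; dict construction / .items()
  -- is PySem.Dict.ofList (last value wins, first position kept), iterated in order.
  let items := (PySem.Dict.ofList dictionary).items
  let candidates := words.foldl (fun cand w => items.foldl (innerStep w) cand) PySem.Dict.empty
  let sorted_candidates := PySem.List.sorted candidates.items (fun p => p.2) true
  match sorted_candidates with
  | [] => "(none)"
  | top :: _ => if top.2 = 0 then "(none)" else top.1

-- ===== PORT B =====
-- sum(4 if w == v else (1 if v in w else 0) for v in value for w in words)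
def keyScore (words value : List String) : Int :=
  (value.flatMap (fun v => words.map (fun w =>
    if w = v then (4 : Int) else if PySem.Str.isIn v w then 1 else 0))).sum

def determine_label_alt (words : List String) (dictionary : List (String × List String)) : String :=
  ((PySem.Dict.ofList dictionary).items.foldl
    (fun best kv =>
      let score := keyScore words kv.2
      if best.2 < score then (kv.1, score) else best)
    ("(none)", 0)).1

-- ===== PRECONDITION & SPEC =====
def Spec_determine_label (words : List String) (dictionary : List (String × List String)) (out : String) : Prop := out = determine_label_alt words dictionary
instance (words : List String) (dictionary : List (String × List String)) (out : String) : Decidable (Spec_determine_label words dictionary out) := by unfold Spec_determine_label; infer_instance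

-- ===== CLAIM (what is proved, stated in full; the proofs are below) =====
def Claim_equal_determine_label : Prop := ∀ (words : List String) (dictionary : List (String × List String)), Dom_determine_label words dictionary → Spec_determine_label words dictionary (determine_label words dictionary)

-- ===== LEMMAS AND PROOFS =====

-- B's loop body, with the score precomputed
def bestStep (b p : String × Int) : String × Int := if b.2 < p.2 then p else b

-- the 0/1/4 score of one (word, correction) pair
def term (w v : String) : Int := if w = v then 4 else if PySem.Str.isIn v w then 1 else 0

-- ---- arithmetic: scoreWord / keyScore as sums ----

theorem scoreWord_eq_sum (w : String) (value : List String) :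
    scoreWord w value = (value.map (term w)).sum := by
  have h : (fun (s : Int) v => if w = v then s + 4 else if PySem.Str.isIn v w then s + 1 else s)
      = fun s v => s + term w v := by
    funext s v
    simp only [term]
    split_ifs <;> ring
  rw [scoreWord, h, PySem.List.foldl_add, zero_add]

theorem keyScore_eq_sum (words value : List String) :
    keyScore words value = (words.map (fun w => (value.map (term w)).sum)).sum := by
  induction value with
  | nil => simp [keyScore]
  | cons v value ih =>
    simp only [keyScore, List.flatMap_cons, List.sum_append, List.map_cons, List.sum_cons] at *
    rw [PySem.List.sum_map_add_int, ih]
    simp only [term]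

theorem totalFold_eq_keyScore (w0 : String) (ws : List String) (value : List String) :
    ws.foldl (fun s w => s + scoreWord w value) (scoreWord w0 value)
      = keyScore (w0 :: ws) value := by
  rw [PySem.List.foldl_add, keyScore_eq_sum]
  simp only [List.map_cons, List.sum_cons, scoreWord_eq_sum]


theorem keyScore_nonneg (words value : List String) : 0 ≤ keyScore words value := by
  apply List.sum_nonneg
  intro x hx
  simp only [List.mem_flatMap, List.mem_map] at hx
  obtain ⟨v, _, w, _, rfl⟩ := hx
  split_ifs <;> norm_num

theorem keyScore_nil (value : List String) : keyScore [] value = 0 := by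
  induction value with
  | nil => simp [keyScore]
  | cons v t ih => simpa [keyScore, List.flatMap_cons] using ih

-- ---- A's candidates dict ----

theorem inner_fresh (w : String) (l : List (String × List String))
    (c : PySem.Dict String Int) (hnd : (c.keys ++ l.map Prod.fst).Nodup) :
    (l.foldl (innerStep w) c).items
      = c.items ++ l.map (fun kv => (kv.1, scoreWord w kv.2)) := by
  induction l generalizing c with
  | nil => simp
  | cons kv l ih =>
    simp only [List.map_cons] at hnd
    have hk : kv.1 ∉ c.keys := by
      rcases List.nodup_append.mp hnd with ⟨-, -, hdisj⟩
      intro hmem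
      exact hdisj _ hmem _ List.mem_cons_self rfl
    have hcont : c.contains kv.1 = false := by
      cases h : c.contains kv.1 with
      | false => rfl
      | true => exact absurd ((PySem.Dict.contains_iff_mem_keys c kv.1).mp h) hk
    have hstep : innerStep w c kv = c.insert kv.1 (scoreWord w kv.2) := by
      simp [innerStep, hcont]
    have hnd' : ((c.insert kv.1 (scoreWord w kv.2)).keys ++ l.map Prod.fst).Nodup := by
      rw [PySem.Dict.keys_insert_of_not_contains c _ hcont, List.append_assoc]
      simpa using hnd
    rw [List.foldl_cons, hstep, ih _ hnd',
      PySem.Dict.items_insert_of_not_contains c _ hcont]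
    simp

theorem inner_mod (w : String) (l : List (String × List String))
    (g : String × List String → Int) (pre : List (String × Int))
    (c : PySem.Dict String Int)
    (hc : c.items = pre ++ l.map (fun kv => (kv.1, g kv)))
    (hnd : c.keys.Nodup) :
    (l.foldl (innerStep w) c).items
      = pre ++ l.map (fun kv => (kv.1, g kv + scoreWord w kv.2)) := by
  induction l generalizing pre c with
  | nil => simpa using hc
  | cons kv l ih =>
    have hkeys : c.keys = pre.map Prod.fst ++ kv.1 :: l.map Prod.fst := by
      simp only [PySem.Dict.keys, hc, List.map_append, List.map_cons, List.map_map]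
      rfl
    have hndk := hnd
    rw [hkeys] at hndk
    rcases List.nodup_append.mp hndk with ⟨-, hnd2, hdisj⟩
    have hpre : ∀ p ∈ pre, p.1 ≠ kv.1 := by
      intro p hp
      have hm : p.1 ∈ pre.map Prod.fst := List.mem_map_of_mem hp
      exact hdisj _ hm _ List.mem_cons_self
    have hl : ∀ kv' ∈ l, kv'.1 ≠ kv.1 := by
      intro kv' hkv'
      have hni : kv.1 ∉ l.map Prod.fst := (List.nodup_cons.mp hnd2).1
      exact fun h => hni (h ▸ List.mem_map_of_mem hkv')
    have hmem : (kv.1, g kv) ∈ c.items := by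
      rw [hc]; exact List.mem_append_right _ (List.mem_cons_self)
    have hcontains : c.contains kv.1 = true := by
      rw [PySem.Dict.contains_iff_mem_keys, hkeys]
      exact List.mem_append_right _ (List.mem_cons_self)
    have hgetD : c.getD kv.1 0 = g kv := PySem.Dict.getD_of_mem_items c hmem hnd 0
    have hstep : innerStep w c kv = c.insert kv.1 (g kv + scoreWord w kv.2) := by
      simp [innerStep, hcontains, hgetD]
    set v' : Int := g kv + scoreWord w kv.2 with hv'
    have hitems' : (c.insert kv.1 v').items
        = (pre ++ [(kv.1, v')]) ++ l.map (fun kv' => (kv'.1, g kv')) := by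
      have h1 : pre.map (fun p => if (p.1 == kv.1) = true then (kv.1, v') else p) = pre := by
        have h0 : pre.map (fun p => if (p.1 == kv.1) = true then (kv.1, v') else p)
            = pre.map id :=
          List.map_congr_left (fun p hp => by simp [hpre p hp])
        rw [h0, List.map_id]
      have h2 : (l.map (fun kv' => (kv'.1, g kv'))).map
          (fun p => if (p.1 == kv.1) = true then (kv.1, v') else p)
          = l.map (fun kv' => (kv'.1, g kv')) := by
        rw [List.map_map]
        exact List.map_congr_left (fun kv' hkv' => by simp [hl kv' hkv'])
      rw [PySem.Dict.items_insert_of_contains c _ hcontains, hc]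
      simp only [List.map_append, List.map_cons]
      rw [h1, h2]
      simp
    have hnd' : (c.insert kv.1 v').keys.Nodup := by
      rw [PySem.Dict.keys_insert_of_contains c _ hcontains]
      exact hnd
    rw [List.foldl_cons, hstep,
      ih (pre ++ [(kv.1, v')]) (c.insert kv.1 v') hitems' hnd']
    simp [hv']

theorem outer_words (items : List (String × List String))
    (hnd : (items.map Prod.fst).Nodup) (ws : List String)
    (g : String × List String → Int) (c : PySem.Dict String Int)
    (hc : c.items = items.map (fun kv => (kv.1, g kv))) :
    ((ws.foldl (fun cand w => items.foldl (innerStep w) cand) c).items)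
      = items.map (fun kv => (kv.1, ws.foldl (fun s w => s + scoreWord w kv.2) (g kv))) := by
  induction ws generalizing g c with
  | nil => simpa using hc
  | cons w ws ih =>
    have hndc : c.keys.Nodup := by
      have : c.keys = items.map Prod.fst := by
        simp only [PySem.Dict.keys, hc, List.map_map]
        rfl
      rw [this]; exact hnd
    have h1 : (items.foldl (innerStep w) c).items
        = items.map (fun kv => (kv.1, g kv + scoreWord w kv.2)) := by
      simpa using inner_mod w items g [] c (by simpa using hc) hndc
    rw [List.foldl_cons, ih (fun kv => g kv + scoreWord w kv.2) _ h1]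
    simp only [List.foldl_cons]

-- ---- head of the descending stable sort = first maximum ----

theorem head_ins (l : List (String × Int)) (b : String × Int) (ys : List (String × Int)) :
    (l.foldl (fun acc x => PySem.List.insertBy (fun a b => decide (b.2 < a.2)) x acc) (b :: ys)).head?
      = some (l.foldl bestStep b) := by
  induction l generalizing b ys with
  | nil => simp
  | cons x l ih =>
    rw [List.foldl_cons, List.foldl_cons]
    by_cases h : b.2 < x.2
    · have hins : PySem.List.insertBy (fun a b => decide (b.2 < a.2)) x (b :: ys) = x :: b :: ys := by
        simp [PySem.List.insertBy, h]
      have hb : bestStep b x = x := by simp [bestStep, h]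
      rw [hins, hb]
      exact ih x (b :: ys)
    · have hins : PySem.List.insertBy (fun a b => decide (b.2 < a.2)) x (b :: ys)
          = b :: PySem.List.insertBy (fun a b => decide (b.2 < a.2)) x ys := by
        simp [PySem.List.insertBy, h]
      have hb : bestStep b x = b := by simp [bestStep, h]
      rw [hins, hb]
      exact ih b _

theorem max?_cons (q : String × Int) (t : List (String × Int)) :
    PySem.List.max? (q :: t) (fun p => p.2) = some (t.foldl bestStep q) := by
  simp only [PySem.List.max?, List.foldl_cons]
  induction t generalizing q with
  | nil => rfl
  | cons x l ih =>
    rw [List.foldl_cons, List.foldl_cons]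
    show List.foldl _ (if q.2 < x.2 then some x else some q) l = _
    by_cases h : q.2 < x.2 <;> simp only [bestStep, h, if_true, if_false] <;> exact ih _

theorem head_sorted_rev (l : List (String × Int)) :
    (PySem.List.sorted l (fun p => p.2) true).head? = PySem.List.max? l (fun p => p.2) := by
  rw [PySem.List.sorted_rev_eq_foldl_insertBy]
  cases l with
  | nil => rfl
  | cons q t =>
    rw [max?_cons, List.foldl_cons]
    exact head_ins t q []

theorem seed_snd_le (l : List (String × Int)) (b : String × Int) :
    b.2 ≤ (l.foldl bestStep b).2 := by
  induction l generalizing b with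
  | nil => simp
  | cons x l ih =>
    rw [List.foldl_cons]
    refine le_trans ?_ (ih (bestStep b x))
    simp only [bestStep]
    split_ifs with h
    · exact le_of_lt h
    · exact le_refl _

theorem stuck_or_grow (l : List (String × Int)) (b : String × Int) :
    l.foldl bestStep b = b ∨ b.2 < (l.foldl bestStep b).2 := by
  induction l generalizing b with
  | nil => left; rfl
  | cons x l ih =>
    rw [List.foldl_cons]
    by_cases h : b.2 < x.2
    · right
      have hx : bestStep b x = x := by simp [bestStep, h]
      rw [hx]
      exact lt_of_lt_of_le h (seed_snd_le l x)
    · have hx : bestStep b x = b := by simp [bestStep, h]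
      rw [hx]
      exact ih b

theorem seed_pair (l : List (String × Int)) (b q : String × Int) (h : b.2 = q.2) :
    l.foldl bestStep b = l.foldl bestStep q
      ∨ (l.foldl bestStep b = b ∧ l.foldl bestStep q = q) := by
  induction l generalizing b q with
  | nil => right; exact ⟨rfl, rfl⟩
  | cons x l ih =>
    rw [List.foldl_cons, List.foldl_cons]
    by_cases hx : b.2 < x.2
    · left
      have h1 : bestStep b x = x := by simp [bestStep, hx]
      have h2 : bestStep q x = x := by simp [bestStep, h ▸ hx]
      rw [h1, h2]
    · have h1 : bestStep b x = b := by simp [bestStep, hx]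
      have h2 : bestStep q x = q := by simp [bestStep, h ▸ hx]
      rw [h1, h2]
      exact ih b q h

theorem best_vs_max (l : List (String × Int)) (hpos : ∀ p ∈ l, 0 ≤ p.2) :
    (l.foldl bestStep ("(none)", 0)).1
      = match PySem.List.max? l (fun p => p.2) with
        | none => "(none)"
        | some m => if m.2 = 0 then "(none)" else m.1 := by
  cases l with
  | nil => rfl
  | cons q t =>
    have hq : 0 ≤ q.2 := hpos q List.mem_cons_self
    rw [max?_cons, List.foldl_cons]
    by_cases h0 : 0 < q.2
    · have hs : bestStep ("(none)", 0) q = q := by simp [bestStep, h0]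
      rw [hs]
      have hm : 0 < (t.foldl bestStep q).2 := lt_of_lt_of_le h0 (seed_snd_le t q)
      simp [hm.ne']
    · have hq0 : q.2 = 0 := le_antisymm (not_lt.mp h0) hq
      have hs : bestStep ("(none)", 0) q = ("(none)", 0) := by simp [bestStep, h0]
      rw [hs]
      rcases seed_pair t ("(none)", 0) q (by simp [hq0]) with heq | ⟨hb, hqq⟩
      · rcases stuck_or_grow t (("(none)", 0) : String × Int) with hstay | hg
        · rw [hstay] at heq ⊢
          rw [← heq]
          simp
        · rw [heq] at hg
          simp [hg.ne']
          rw [heq]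
      · rw [hb, hqq]
        simp [hq0]

-- ===== VERDICT (by name: the statement is the Claim_ definition above) =====
theorem determine_label_spec : Claim_equal_determine_label := by
  intro words dictionary _
  show determine_label words dictionary = determine_label_alt words dictionary
  have hnd : (((PySem.Dict.ofList dictionary).items).map Prod.fst).Nodup := by
    have h := PySem.Dict.nodup_keys_ofList (ν := List String) dictionary
    have hk : (PySem.Dict.ofList dictionary).keys
        = ((PySem.Dict.ofList dictionary).items).map Prod.fst := by
      simp only [PySem.Dict.keys]
    rwa [hk] at h
  cases words with
  | nil =>
    have hB : ∀ (l : List (String × List String)),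
        l.foldl (fun best kv =>
          let score := keyScore [] kv.2
          if best.2 < score then (kv.1, score) else best) (("(none)" : String), (0 : Int))
          = ("(none)", 0) := by
      intro l
      induction l with
      | nil => rfl
      | cons kv l ih =>
        rw [List.foldl_cons]
        simpa [keyScore_nil] using ih
    have hA : determine_label [] dictionary = "(none)" := rfl
    have hB' : determine_label_alt [] dictionary = "(none)" := by
      unfold determine_label_alt
      rw [hB]
    rw [hA, hB']
  | cons w0 ws =>
    have hfresh : ((((PySem.Dict.ofList dictionary).items)).foldl (innerStep w0) PySem.Dict.empty).items
        = ((PySem.Dict.ofList dictionary).items).map (fun kv => (kv.1, scoreWord w0 kv.2)) := by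
      have h := inner_fresh w0 ((PySem.Dict.ofList dictionary).items) PySem.Dict.empty
        (by rw [PySem.Dict.keys_empty]; simpa using hnd)
      rw [h]
      rw [show PySem.Dict.empty.items = ([] : List (String × Int)) from rfl]
      rfl
    have hcand : (((w0 :: ws).foldl
          (fun cand w => ((PySem.Dict.ofList dictionary).items).foldl (innerStep w) cand)
          PySem.Dict.empty)).items
        = ((PySem.Dict.ofList dictionary).items).map
            (fun kv => (kv.1, keyScore (w0 :: ws) kv.2)) := by
      rw [List.foldl_cons]
      have h := outer_words ((PySem.Dict.ofList dictionary).items) hnd ws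
        (fun kv => scoreWord w0 kv.2) _ hfresh
      rw [h]
      exact List.map_congr_left (fun kv _ => by rw [totalFold_eq_keyScore])
    have hfold : ((PySem.Dict.ofList dictionary).items).foldl
          (fun best kv =>
            let score := keyScore (w0 :: ws) kv.2
            if best.2 < score then (kv.1, score) else best) (("(none)" : String), (0 : Int))
        = (((PySem.Dict.ofList dictionary).items).map
            (fun kv => (kv.1, keyScore (w0 :: ws) kv.2))).foldl bestStep
            (("(none)" : String), (0 : Int)) := by
      rw [List.foldl_map]
      rfl
    have hnon : ∀ p ∈ ((PySem.Dict.ofList dictionary).items).map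
        (fun kv => (kv.1, keyScore (w0 :: ws) kv.2)), 0 ≤ p.2 := by
      intro p hp
      obtain ⟨kv, -, rfl⟩ := List.mem_map.mp hp
      exact keyScore_nonneg _ _
    have hhead := head_sorted_rev (((PySem.Dict.ofList dictionary).items).map
      (fun kv => (kv.1, keyScore (w0 :: ws) kv.2)))
    simp only [determine_label, determine_label_alt]
    rw [hcand, hfold, best_vs_max _ hnon, ← hhead]
    rcases hL : PySem.List.sorted (((PySem.Dict.ofList dictionary).items).map
        (fun kv => (kv.1, keyScore (w0 :: ws) kv.2))) (fun p => p.2) true with _ | ⟨top, rest⟩ <;>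
      rw [hL] <;> rfl
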